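-- pv_equiv track=rewrite | github.com/ConradMearns/without-objective | PNF-Editor/file_editor.py | parse_edit_blocks
-- ===== SOURCE A (Python) =====
-- def parse_edit_blocks(edit_blocks_str: str) -> list[tuple[str, str]]:
--     """Parse edit blocks into (search, replace) tuples."""
--     blocks = []
--     lines = edit_blocks_str.split('\n')
--
--     i = 0
--     while i < len(lines):
--         if lines[i].strip() == '<<<SEARCH':
--             # Find the separator
--             search_lines = []
--             i += 1
--             while i < len(lines) and lines[i].strip() != '===':
--                 search_lines.append(lines[i])
--                 i += 1
--
--             # Find the end marker
--             replace_lines = []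
--             i += 1  # Skip ===
--             while i < len(lines) and lines[i].strip() != '>>>SEARCH':
--                 replace_lines.append(lines[i])
--                 i += 1
--
--             search = '\n'.join(search_lines)
--             replace = '\n'.join(replace_lines)
--             blocks.append((search, replace))
--         i += 1
--
--     return blocks
-- ===== SOURCE B (Python) =====
-- def parse_edit_blocks(edit_blocks_str: str) -> list[tuple[str, str]]:
--     """Parse edit blocks into (search, replace) tuples (single state-machine pass)."""
--     blocks = []
--     state = 0  # 0 = outside, 1 = in search, 2 = in replace
--     search_lines = []
--     replace_lines = []
--     for line in edit_blocks_str.split('\n'):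
--         s = line.strip()
--         if state == 0:
--             if s == '<<<SEARCH':
--                 search_lines = []
--                 replace_lines = []
--                 state = 1
--         elif state == 1:
--             if s == '===':
--                 state = 2
--             else:
--                 search_lines.append(line)
--         else:
--             if s == '>>>SEARCH':
--                 blocks.append(('\n'.join(search_lines), '\n'.join(replace_lines)))
--                 state = 0
--             else:
--                 replace_lines.append(line)
--     if state != 0:
--         blocks.append(('\n'.join(search_lines), '\n'.join(replace_lines)))
--     return blocks
-- ===== Notes on version B (the rewrite author's own statement) =====
-- stated objective: alternative
-- what changed: Replaced the index-driven while loop with two nested inner scanning loops by a single for-loop over the lines driven by a three-state machine (outside / in-search / in-replace) with a final flush for unterminated blocks.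
import Mathlib
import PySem

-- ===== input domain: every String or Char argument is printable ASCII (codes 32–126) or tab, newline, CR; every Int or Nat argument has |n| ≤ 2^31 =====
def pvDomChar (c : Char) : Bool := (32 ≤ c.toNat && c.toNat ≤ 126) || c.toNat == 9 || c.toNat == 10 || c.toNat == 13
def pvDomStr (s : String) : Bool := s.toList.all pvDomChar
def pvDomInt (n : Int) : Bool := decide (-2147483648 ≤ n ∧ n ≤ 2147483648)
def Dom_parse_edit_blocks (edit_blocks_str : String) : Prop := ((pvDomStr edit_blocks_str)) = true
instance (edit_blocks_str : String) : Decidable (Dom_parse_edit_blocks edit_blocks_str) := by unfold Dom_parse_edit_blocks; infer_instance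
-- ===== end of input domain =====

-- B is a structurally different single-pass state-machine parser; return values agree with A everywhere.

-- ===== PORT A =====
-- inner while loop: collect lines until one strips to '==='; returns (collected, rest after the separator)
def pvATakeSearch : List String → List String × List String
  | [] => ([], [])
  | l :: ls =>
    if PySem.Str.strip l == "===" then ([], ls)
    else
      let p := pvATakeSearch ls
      (l :: p.1, p.2)

-- inner while loop: collect lines until one strips to '>>>SEARCH'; returns (collected, rest after the marker)
def pvATakeRepl : List String → List String × List String
  | [] => ([], [])
  | l :: ls =>
    if PySem.Str.strip l == ">>>SEARCH" then ([], ls)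
    else
      let p := pvATakeRepl ls
      (l :: p.1, p.2)

theorem pvATakeSearch_len (ls : List String) : (pvATakeSearch ls).2.length ≤ ls.length := by
  induction ls with
  | nil => simp [pvATakeSearch]
  | cons l t ih => simp only [pvATakeSearch]; split <;> simp <;> omega

theorem pvATakeRepl_len (ls : List String) : (pvATakeRepl ls).2.length ≤ ls.length := by
  induction ls with
  | nil => simp [pvATakeRepl]
  | cons l t ih => simp only [pvATakeRepl]; split <;> simp <;> omega

-- the outer while loop over the remaining lines
def pvAOuter : List String → List (String × String)
  | [] => []
  | l :: ls =>
    if PySem.Str.strip l == "<<<SEARCH" then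
      let p := pvATakeSearch ls
      let q := pvATakeRepl p.2
      (PySem.Str.join "\n" p.1, PySem.Str.join "\n" q.1) :: pvAOuter q.2
    else pvAOuter ls
termination_by ls => ls.length
decreasing_by
  · have h1 := pvATakeSearch_len ls
    have h2 := pvATakeRepl_len (pvATakeSearch ls).2
    simp; omega
  · simp

def parse_edit_blocks (edit_blocks_str : String) : List (String × String) :=
  pvAOuter ((PySem.Str.split? edit_blocks_str "\n").getD [])

-- ===== PORT B =====
-- state machine: (blocks, state, search_lines, replace_lines); state 0 = outside, 1 = in search, 2 = in replace
def pvBStep (st : List (String × String) × Int × List String × List String) (line : String) :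
    List (String × String) × Int × List String × List String :=
  let s := PySem.Str.strip line
  if st.2.1 = 0 then
    if s == "<<<SEARCH" then (st.1, 1, [], []) else st
  else if st.2.1 = 1 then
    if s == "===" then (st.1, 2, st.2.2.1, st.2.2.2)
    else (st.1, 1, st.2.2.1 ++ [line], st.2.2.2)
  else
    if s == ">>>SEARCH" then
      (st.1 ++ [(PySem.Str.join "\n" st.2.2.1, PySem.Str.join "\n" st.2.2.2)], 0, st.2.2.1, st.2.2.2)
    else (st.1, 2, st.2.2.1, st.2.2.2 ++ [line])

def pvBFinish (st : List (String × String) × Int × List String × List String) : List (String × String) :=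
  if st.2.1 ≠ 0 then st.1 ++ [(PySem.Str.join "\n" st.2.2.1, PySem.Str.join "\n" st.2.2.2)]
  else st.1

def parse_edit_blocks_alt (edit_blocks_str : String) : List (String × String) :=
  pvBFinish (((PySem.Str.split? edit_blocks_str "\n").getD []).foldl pvBStep ([], 0, [], []))

-- ===== PRECONDITION & SPEC =====
def Spec_parse_edit_blocks (edit_blocks_str : String) (out : List (String × String)) : Prop := out = parse_edit_blocks_alt edit_blocks_str
instance (edit_blocks_str : String) (out : List (String × String)) : Decidable (Spec_parse_edit_blocks edit_blocks_str out) := by unfold Spec_parse_edit_blocks; infer_instance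

-- ===== CLAIM (what is proved, stated in full; the proofs are below) =====
def Claim_equal_parse_edit_blocks : Prop := ∀ (edit_blocks_str : String), Dom_parse_edit_blocks edit_blocks_str → Spec_parse_edit_blocks edit_blocks_str (parse_edit_blocks edit_blocks_str)

-- ===== LEMMAS AND PROOFS =====

-- the three loop invariants: what B's fold computes from each state, in terms of A's helpers
def pvP0 (ls : List String) : Prop :=
  ∀ acc sl rl, pvBFinish (ls.foldl pvBStep (acc, 0, sl, rl)) = acc ++ pvAOuter ls

def pvP2 (ls : List String) : Prop :=
  ∀ acc sl rl, pvBFinish (ls.foldl pvBStep (acc, 2, sl, rl)) =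
    acc ++ ((PySem.Str.join "\n" sl, PySem.Str.join "\n" (rl ++ (pvATakeRepl ls).1)) :: pvAOuter (pvATakeRepl ls).2)

def pvP1 (ls : List String) : Prop :=
  ∀ acc sl rl, pvBFinish (ls.foldl pvBStep (acc, 1, sl, rl)) =
    acc ++ ((PySem.Str.join "\n" (sl ++ (pvATakeSearch ls).1),
             PySem.Str.join "\n" (rl ++ (pvATakeRepl (pvATakeSearch ls).2).1)) ::
            pvAOuter (pvATakeRepl (pvATakeSearch ls).2).2)

theorem pvMain : ∀ n ls, ls.length ≤ n → pvP0 ls ∧ pvP1 ls ∧ pvP2 ls := by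
  intro n
  induction n with
  | zero =>
    intro ls h
    have : ls = [] := List.eq_nil_of_length_eq_zero (Nat.le_zero.mp h)
    subst this
    refine ⟨?_, ?_, ?_⟩ <;> intro acc sl rl <;>
      simp [pvBFinish, pvAOuter, pvATakeSearch, pvATakeRepl]
  | succ n ih =>
    intro ls h
    cases ls with
    | nil =>
      refine ⟨?_, ?_, ?_⟩ <;> intro acc sl rl <;>
        simp [pvBFinish, pvAOuter, pvATakeSearch, pvATakeRepl]
    | cons l t =>
      have ht : t.length ≤ n := by simpa using h
      have iht := ih t ht
      refine ⟨?_, ?_, ?_⟩ <;> intro acc sl rl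
      · -- state 0
        by_cases hs : PySem.Str.strip l == "<<<SEARCH"
        · simp only [List.foldl_cons, pvBStep, hs]
          norm_num
          rw [(iht.2.1) acc [] []]
          simp [pvAOuter, hs]
        · simp only [List.foldl_cons, pvBStep, hs]
          norm_num
          rw [(iht.1) acc sl rl]
          simp [pvAOuter, hs]
      · -- state 1
        by_cases hs : PySem.Str.strip l == "==="
        · simp only [List.foldl_cons, pvBStep, hs]
          norm_num
          rw [(iht.2.2) acc sl rl]
          simp [pvATakeSearch, hs]
        · simp only [List.foldl_cons, pvBStep, hs]
          norm_num
          rw [(iht.2.1) acc (sl ++ [l]) rl]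
          simp [pvATakeSearch, hs]
      · -- state 2
        by_cases hs : PySem.Str.strip l == ">>>SEARCH"
        · simp only [List.foldl_cons, pvBStep, hs]
          norm_num
          rw [(iht.1) _ sl rl]
          simp [pvATakeRepl, hs]
        · simp only [List.foldl_cons, pvBStep, hs]
          norm_num
          rw [(iht.2.2) acc sl (rl ++ [l])]
          simp [pvATakeRepl, hs]

-- ===== VERDICT (by name: the statement is the Claim_ definition above) =====
theorem parse_edit_blocks_spec : Claim_equal_parse_edit_blocks := by
  intro s _
  unfold Spec_parse_edit_blocks parse_edit_blocks parse_edit_blocks_alt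
  exact ((pvMain _ _ le_rfl).1 [] [] []).symm
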